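-- pv_equiv track=rewrite | github.com/jamie-jjd/2021_spring_introduction_to_data_structure | practice/09/solution.py | BinarySearchTreeSimulation
-- ===== SOURCE A (Python) =====
-- class Node:
--     def __init__(self, v):
--         self.v = v
--         self.left = None
--         self.right = None
--
-- def insert(n: Node, v):
--     if n is None:
--         return Node(v)
--     if v < n.v:
--         n.left = insert(n.left, v)
--     elif n.v < v:
--         n.right = insert(n.right, v)
--     return n
--
-- def find(n: Node, v):
--     if n is None:
--         return False
--     elif v == n.v:
--         return True
--     elif v < n.v:
--         return find(n.left, v)
--     return find(n.right, v)
--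
-- def pre(n: Node, v):
--     now = n
--     pre = 0
--     while now is not None:
--         if now.v < v:
--             pre = now.v
--             now = now.right
--         else:
--             now = now.left
--     return pre
--
-- def succ(n: Node, v):
--     now = n
--     succ = 0
--     while now is not None:
--         if v < now.v:
--             succ = now.v
--             now = now.left
--         else:
--             now = now.right
--     return succ
--
-- def Min(n: Node):
--     if n is None:
--         return 0
--     now = n
--     while now.left is not None:
--         now = now.left
--     return now.v
--
-- def Max(n: Node):
--     if n is None:
--         return 0
--     now = n
--     while now.right is not None:
--         now = now.right
--     return now.v
--
-- def BinarySearchTreeSimulation(m, queries):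
--     res = []
--     head = None
--     for L in queries:
--         if L[0] == 1:
--             head = insert(head, L[1])
--         elif L[0] == 2:
--             res.append( 1 if find(head, L[1]) else 0 )
--         elif L[0] == 3:
--             res.append(pre(head, L[1]))
--         elif L[0] == 4:
--             res.append(succ(head, L[1]))
--         elif L[0] == 5:
--             res.append(Min(head))
--         elif L[0] == 6:
--             res.append(Max(head))
--     return res
-- ===== SOURCE B (Python) =====
-- import bisect
--
-- def BinarySearchTreeSimulation(m, queries):
--     res = []
--     xs = []  # sorted list of the distinct inserted values
--     for L in queries:
--         op = L[0]
--         if op == 1: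
--             v = L[1]
--             i = bisect.bisect_left(xs, v)
--             if i == len(xs) or xs[i] != v:
--                 xs.insert(i, v)
--         elif op == 2:
--             v = L[1]
--             i = bisect.bisect_left(xs, v)
--             res.append(1 if i < len(xs) and xs[i] == v else 0)
--         elif op == 3:
--             v = L[1]
--             i = bisect.bisect_left(xs, v)
--             res.append(xs[i - 1] if i > 0 else 0)
--         elif op == 4:
--             v = L[1]
--             i = bisect.bisect_right(xs, v)
--             res.append(xs[i] if i < len(xs) else 0)
--         elif op == 5:
--             res.append(xs[0] if xs else 0)
--         elif op == 6:
--             res.append(xs[-1] if xs else 0)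
--     return res
-- ===== Notes on version B (the rewrite author's own statement) =====
-- stated objective: alternative
-- what changed: Replaces the pointer-based unbalanced binary search tree (recursive insert/find and while-loop tree walks) by a sorted duplicate-free Python list queried and updated with bisect binary searches.
-- outside the precondition, e.g. on BinarySearchTreeSimulation(1, [[]]): A raises IndexError, B raises IndexError; on BinarySearchTreeSimulation(1, [[2]]): A raises IndexError, B raises IndexError
import Mathlib
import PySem

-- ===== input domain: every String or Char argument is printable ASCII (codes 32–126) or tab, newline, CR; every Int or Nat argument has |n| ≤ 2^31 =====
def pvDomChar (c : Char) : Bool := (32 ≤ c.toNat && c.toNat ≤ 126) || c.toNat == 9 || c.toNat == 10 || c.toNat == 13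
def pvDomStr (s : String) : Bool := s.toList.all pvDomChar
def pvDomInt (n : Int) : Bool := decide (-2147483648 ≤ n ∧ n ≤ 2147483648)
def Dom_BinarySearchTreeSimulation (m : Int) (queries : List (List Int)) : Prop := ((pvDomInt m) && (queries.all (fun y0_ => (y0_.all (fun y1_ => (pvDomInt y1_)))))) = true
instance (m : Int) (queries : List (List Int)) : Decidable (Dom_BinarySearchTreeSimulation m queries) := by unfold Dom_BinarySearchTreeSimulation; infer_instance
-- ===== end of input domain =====

-- B replaces A's pointer-based binary search tree by a sorted duplicate-free list queried
-- and updated with bisect (objective: alternative data structure, same measured cost).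

-- ===== PORT A =====
-- A's Node objects become an inductive tree; each Python helper is one structural recursion.
inductive PTree where
  | nil : PTree
  | node : PTree → Int → PTree → PTree

-- def insert(n, v)
def tinsert (t : PTree) (v : Int) : PTree :=
  match t with
  | .nil => .node .nil v .nil
  | .node l x r =>
    if v < x then .node (tinsert l v) x r
    else if x < v then .node l x (tinsert r v)
    else .node l x r

-- def find(n, v)
def tfind (t : PTree) (v : Int) : Bool :=
  match t with
  | .nil => false
  | .node l x r =>
    if v = x then true
    else if v < x then tfind l v
    else tfind r v

-- def pre(n, v): the while loop, with 'pre' as accumulator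
def tpre (t : PTree) (v : Int) (acc : Int) : Int :=
  match t with
  | .nil => acc
  | .node l x r => if x < v then tpre r v x else tpre l v acc

-- def succ(n, v): the while loop, with 'succ' as accumulator
def tsucc (t : PTree) (v : Int) (acc : Int) : Int :=
  match t with
  | .nil => acc
  | .node l x r => if v < x then tsucc l v x else tsucc r v acc

-- def Min(n): descend the left spine
def tmin (t : PTree) : Int :=
  match t with
  | .nil => 0
  | .node .nil x _ => x
  | .node l x _ => tmin l

-- def Max(n): descend the right spine
def tmax (t : PTree) : Int :=
  match t with
  | .nil => 0
  | .node _ x .nil => x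
  | .node _ x r => tmax r

-- the main loop of A ('res' is the accumulator; L[0]/L[1] exist on inputs admitted by Pre_)
def loopA (t : PTree) (res : List Int) (qs : List (List Int)) : List Int :=
  match qs with
  | [] => res
  | L :: rest =>
    let op := L.getD 0 0
    if op = 1 then loopA (tinsert t (L.getD 1 0)) res rest
    else if op = 2 then loopA t (res ++ [if tfind t (L.getD 1 0) then 1 else 0]) rest
    else if op = 3 then loopA t (res ++ [tpre t (L.getD 1 0) 0]) rest
    else if op = 4 then loopA t (res ++ [tsucc t (L.getD 1 0) 0]) rest
    else if op = 5 then loopA t (res ++ [tmin t]) rest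
    else if op = 6 then loopA t (res ++ [tmax t]) rest
    else loopA t res rest

def BinarySearchTreeSimulation (m : Int) (queries : List (List Int)) : List Int :=
  loopA .nil [] queries

-- ===== PORT B =====
-- bisect.bisect_left / bisect.bisect_right, ported as the corresponding functions on the
-- (always sorted) list xs: number of leading elements < v (resp. ≤ v).
def bl (xs : List Int) (v : Int) : Nat :=
  match xs with
  | [] => 0
  | x :: t => if x < v then bl t v + 1 else 0

def br (xs : List Int) (v : Int) : Nat :=
  match xs with
  | [] => 0
  | x :: t => if x ≤ v then br t v + 1 else 0

-- the main loop of B ('xs' is the sorted list, 'res' the output accumulator)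
def loopB (xs : List Int) (res : List Int) (qs : List (List Int)) : List Int :=
  match qs with
  | [] => res
  | L :: rest =>
    let op := L.getD 0 0
    if op = 1 then
      let v := L.getD 1 0
      let i := bl xs v
      loopB (if i = xs.length ∨ xs.getD i 0 ≠ v then xs.insertIdx i v else xs) res rest
    else if op = 2 then
      let v := L.getD 1 0
      let i := bl xs v
      loopB xs (res ++ [if i < xs.length ∧ xs.getD i 0 = v then 1 else 0]) rest
    else if op = 3 then
      let v := L.getD 1 0
      let i := bl xs v
      loopB xs (res ++ [if i = 0 then 0 else xs.getD (i - 1) 0]) rest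
    else if op = 4 then
      let v := L.getD 1 0
      let i := br xs v
      loopB xs (res ++ [if i < xs.length then xs.getD i 0 else 0]) rest
    else if op = 5 then loopB xs (res ++ [xs.headD 0]) rest
    else if op = 6 then loopB xs (res ++ [if xs.isEmpty then 0 else xs.getLastD 0]) rest
    else loopB xs res rest

def BinarySearchTreeSimulation_alt (m : Int) (queries : List (List Int)) : List Int :=
  loopB [] [] queries

-- ===== PRECONDITION & SPEC =====
-- Pre_ excludes exactly the queries on which A raises IndexError: an empty query (L[0]) and a
-- query of opcode 1–4 without a second element (L[1]).
def Pre_BinarySearchTreeSimulation (m : Int) (queries : List (List Int)) : Prop :=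
  ∀ q ∈ queries, q ≠ [] ∧
    ((q.getD 0 0 = 1 ∨ q.getD 0 0 = 2 ∨ q.getD 0 0 = 3 ∨ q.getD 0 0 = 4) → 2 ≤ q.length)

instance (m : Int) (queries : List (List Int)) : Decidable (Pre_BinarySearchTreeSimulation m queries) := by
  unfold Pre_BinarySearchTreeSimulation; infer_instance

def pvWitness_BinarySearchTreeSimulation : Int × List (List Int) :=
  (6, [[1, 5], [1, 2], [2, 5], [3, 5], [4, 2], [5], [6]])

def Spec_BinarySearchTreeSimulation (m : Int) (queries : List (List Int)) (out : List Int) : Prop := out = BinarySearchTreeSimulation_alt m queries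
instance (m : Int) (queries : List (List Int)) (out : List Int) : Decidable (Spec_BinarySearchTreeSimulation m queries out) := by unfold Spec_BinarySearchTreeSimulation; infer_instance

-- ===== CLAIM (what is proved, stated in full; the proofs are below) =====
def Claim_equal_BinarySearchTreeSimulation : Prop := ∀ (m : Int) (queries : List (List Int)), Dom_BinarySearchTreeSimulation m queries → Pre_BinarySearchTreeSimulation m queries → Spec_BinarySearchTreeSimulation m queries (BinarySearchTreeSimulation m queries)

-- ===== LEMMAS AND PROOFS =====

-- inorder traversal of A's tree: the sorted list it represents
def inorder (t : PTree) : List Int :=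
  match t with
  | .nil => []
  | .node l x r => inorder l ++ x :: inorder r

-- plain sorted insertion (proof-side stepping stone between tinsert and B's insertIdx form)
def ins (xs : List Int) (v : Int) : List Int :=
  match xs with
  | [] => [v]
  | x :: t => if v < x then v :: x :: t else if x < v then x :: ins t v else x :: t

theorem ins_append_lt (l : List Int) (x v : Int) (r : List Int) (h : v < x) :
    ins (l ++ x :: r) v = ins l v ++ x :: r := by
  induction l with
  | nil => simp [ins, h]
  | cons y t ih =>
    by_cases h1 : v < y
    · simp [ins, h1]
    · by_cases h2 : y < v
      · simp [ins, h1, h2, ih]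
      · simp [ins, h1, h2]

theorem ins_append_gt (l : List Int) (x v : Int) (r : List Int)
    (hl : ∀ y ∈ l, y < v) (h : x < v) :
    ins (l ++ x :: r) v = l ++ x :: ins r v := by
  induction l with
  | nil => simp [ins, h, not_lt.mpr (le_of_lt h)]
  | cons y t ih =>
    have hy : y < v := hl y (by simp)
    simp [ins, not_lt.mpr (le_of_lt hy), hy,
      ih (fun z hz => hl z (by simp [hz]))]

theorem ins_append_eq (l : List Int) (x : Int) (r : List Int)
    (hl : ∀ y ∈ l, y < x) :
    ins (l ++ x :: r) x = l ++ x :: r := by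
  induction l with
  | nil => simp [ins]
  | cons y t ih =>
    have hy : y < x := hl y (by simp)
    simp [ins, not_lt.mpr (le_of_lt hy), hy,
      ih (fun z hz => hl z (by simp [hz]))]

theorem mem_ins (xs : List Int) (v y : Int) (h : y ∈ ins xs v) : y ∈ xs ∨ y = v := by
  induction xs with
  | nil => simp [ins] at h; simp [h]
  | cons x t ih =>
    by_cases h1 : v < x
    · simp [ins, h1] at h
      rcases h with h | h | h <;> simp [h]
    · by_cases h2 : x < v
      · simp [ins, h1, h2] at h
        rcases h with h | h
        · simp [h]
        · rcases ih h with h | h <;> simp [h]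
      · simp [ins, h1, h2] at h
        rcases h with h | h <;> simp [h]

theorem pairwise_ins (xs : List Int) (v : Int) (h : xs.Pairwise (· < ·)) :
    (ins xs v).Pairwise (· < ·) := by
  induction xs with
  | nil => simp [ins]
  | cons x t ih =>
    rw [List.pairwise_cons] at h
    by_cases h1 : v < x
    · simp only [ins, if_pos h1]
      refine List.pairwise_cons.mpr ⟨?_, List.pairwise_cons.mpr ⟨h.1, h.2⟩⟩
      intro y hy
      rcases List.mem_cons.mp hy with rfl | hm
      · exact h1
      · exact lt_trans h1 (h.1 y hm)
    · by_cases h2 : x < v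
      · simp [ins, h1, h2, List.pairwise_cons]
        refine ⟨fun y hy => ?_, ih h.2⟩
        rcases mem_ins t v y hy with h3 | h3
        · exact h.1 y h3
        · simpa [h3] using h2
      · simpa [ins, h1, h2, List.pairwise_cons] using ⟨h.1, h.2⟩

theorem inorder_tinsert (t : PTree) (v : Int) (h : (inorder t).Pairwise (· < ·)) :
    inorder (tinsert t v) = ins (inorder t) v := by
  induction t with
  | nil => simp [tinsert, inorder, ins]
  | node l x r ihl ihr =>
    simp only [inorder] at h
    have hl := (List.pairwise_append.mp h).1
    have hxr := (List.pairwise_append.mp h).2.1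
    have hcross := (List.pairwise_append.mp h).2.2
    by_cases h1 : v < x
    · simp [tinsert, h1, inorder, ihl hl, ins_append_lt _ _ _ _ h1]
    · by_cases h2 : x < v
      · have hr : (inorder r).Pairwise (· < ·) := (List.pairwise_cons.mp hxr).2
        have hlv : ∀ y ∈ inorder l, y < v :=
          fun y hy => lt_trans (hcross y hy x (by simp)) h2
        simp [tinsert, h1, h2, inorder, ihr hr, ins_append_gt _ _ _ _ hlv h2]
      · have hveq : v = x := le_antisymm (not_lt.mp h2) (not_lt.mp h1)
        have hlx : ∀ y ∈ inorder l, y < x := fun y hy => hcross y hy x (by simp)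
        simp [tinsert, h1, h2, inorder, hveq, ins_append_eq _ _ _ hlx]

-- ins in B's bisect/insertIdx clothing (no sortedness needed)
theorem ins_eq_insertIdx (xs : List Int) (v : Int) :
    ins xs v = if bl xs v = xs.length ∨ xs.getD (bl xs v) 0 ≠ v
               then xs.insertIdx (bl xs v) v else xs := by
  induction xs with
  | nil => simp [ins, bl]
  | cons x t ih =>
    by_cases h2 : x < v
    · have h1 : ¬ v < x := not_lt.mpr (le_of_lt h2)
      simp only [ins, bl, if_neg h1, if_pos h2, h2, if_true]
      rw [ih]
      by_cases hc : bl t v = t.length ∨ t.getD (bl t v) 0 ≠ v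
      · rw [if_pos hc, if_pos]
        · simp [List.insertIdx]
        · simpa using hc
      · rw [if_neg hc, if_neg]
        simpa using hc
    · by_cases h1 : v < x
      · have hne : x ≠ v := ne_of_gt h1
        simp [ins, bl, h1, h2, hne, List.insertIdx]
      · have hveq : x = v := le_antisymm (not_lt.mp h1) (not_lt.mp h2)
        simp [ins, bl, h1, h2, hveq]

-- membership on a strictly sorted list, in B's bisect clothing
theorem mem_iff_bl (xs : List Int) (v : Int) (h : xs.Pairwise (· < ·)) :
    v ∈ xs ↔ (bl xs v < xs.length ∧ xs.getD (bl xs v) 0 = v) := by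
  induction xs with
  | nil => simp [bl]
  | cons x t ih =>
    rw [List.pairwise_cons] at h
    by_cases h2 : x < v
    · have hne : v ≠ x := ne_of_gt h2
      simp [bl, h2, hne, ih h.2]
    · by_cases hx : x = v
      · simp [bl, h2, hx]
      · have hxv : v < x := lt_of_le_of_ne (not_lt.mp h2) (Ne.symm hx)
        have hnt : v ∉ t := fun hm => absurd (h.1 v hm) (not_lt.mpr (le_of_lt hxv))
        simp [bl, h2, hx, Ne.symm hx, hnt]

theorem tfind_mem (t : PTree) (v : Int) (h : (inorder t).Pairwise (· < ·)) :
    tfind t v = true ↔ v ∈ inorder t := by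
  induction t with
  | nil => simp [tfind, inorder]
  | node l x r ihl ihr =>
    simp only [inorder] at h ⊢
    have hp := List.pairwise_append.mp h
    have hl := hp.1
    have hr := (List.pairwise_cons.mp hp.2.1).2
    by_cases h1 : v = x
    · simp [tfind, h1]
    · by_cases h2 : v < x
      · have hnx : v ∉ x :: inorder r := by
          simp only [List.mem_cons]
          rintro (rfl | hm)
          · exact h1 rfl
          · exact absurd ((List.pairwise_cons.mp hp.2.1).1 v hm)
              (not_lt.mpr (le_of_lt h2))
        simp only [tfind, if_neg h1, if_pos h2, List.mem_append]
        rw [ihl hl]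
        constructor
        · exact Or.inl
        · rintro (hm | hm)
          · exact hm
          · exact absurd hm hnx
      · have hnl : v ∉ inorder l := by
          intro hm
          have := hp.2.2 v hm x (by simp)
          have hxv : x < v := lt_of_le_of_ne (not_lt.mp h2) (Ne.symm h1)
          exact absurd this (not_lt.mpr (le_of_lt hxv))
        simp only [tfind, if_neg h1, if_neg h2, List.mem_append, List.mem_cons]
        rw [ihr hr]
        constructor
        · exact fun hm => Or.inr (Or.inr hm)
        · rintro (hm | hm | hm)
          · exact absurd hm hnl
          · exact absurd hm h1
          · exact hm

-- pre: the tree walk equals a left fold over the inorder list (sortedness needed)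
theorem foldl_pre_const (v : Int) (ys : List Int) (acc : Int)
    (h : ∀ y ∈ ys, ¬ y < v) :
    ys.foldl (fun p y => if y < v then y else p) acc = acc := by
  induction ys generalizing acc with
  | nil => rfl
  | cons y t ih =>
    simp only [List.foldl_cons, if_neg (h y (by simp))]
    exact ih acc (fun z hz => h z (by simp [hz]))

theorem tpre_foldl (t : PTree) (v : Int) (h : (inorder t).Pairwise (· < ·)) (acc : Int) :
    tpre t v acc = (inorder t).foldl (fun p y => if y < v then y else p) acc := by
  induction t generalizing acc with
  | nil => simp [tpre, inorder]
  | node l x r ihl ihr =>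
    simp only [inorder] at h ⊢
    have hp := List.pairwise_append.mp h
    by_cases h1 : x < v
    · simp only [tpre, if_pos h1, List.foldl_append, List.foldl_cons, if_pos h1]
      exact ihr (List.pairwise_cons.mp hp.2.1).2 x
    · have hr : ∀ y ∈ x :: inorder r, ¬ y < v := by
        intro y hy
        rcases List.mem_cons.mp hy with rfl | hm
        · exact h1
        · exact fun hlt => h1 (lt_trans ((List.pairwise_cons.mp hp.2.1).1 y hm) hlt)
      simp only [tpre, if_neg h1, List.foldl_append]
      rw [ihl hp.1 acc]
      exact (foldl_pre_const v (x :: inorder r) _ hr).symm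

theorem foldl_pre_bl (v : Int) (xs : List Int) (acc : Int) (hs : xs.Pairwise (· < ·)) :
    xs.foldl (fun p y => if y < v then y else p) acc =
      if bl xs v = 0 then acc else xs.getD (bl xs v - 1) 0 := by
  induction xs generalizing acc with
  | nil => simp [bl]
  | cons x t ih =>
    rw [List.pairwise_cons] at hs
    by_cases h1 : x < v
    · simp only [List.foldl_cons, if_pos h1, bl, ih _ hs.2]
      cases hbt : bl t v with
      | zero => simp [hbt, h1]
      | succ n => simp [hbt, h1, List.getD]
    · have ht : ∀ y ∈ t, ¬ y < v :=
        fun y hy hlt => h1 (lt_trans (hs.1 y hy) hlt)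
      simp [List.foldl_cons, if_neg h1, bl, h1, foldl_pre_const v t acc ht]

-- succ: the tree walk equals a right fold over the inorder list
theorem foldr_succ_const (v : Int) (ys : List Int) (acc : Int)
    (h : ∀ y ∈ ys, ¬ v < y) :
    ys.foldr (fun y s => if v < y then y else s) acc = acc := by
  induction ys with
  | nil => rfl
  | cons y t ih =>
    simp only [List.foldr_cons, if_neg (h y (by simp))]
    exact ih (fun z hz => h z (by simp [hz]))

theorem tsucc_foldr (t : PTree) (v : Int) (h : (inorder t).Pairwise (· < ·)) (acc : Int) :
    tsucc t v acc = (inorder t).foldr (fun y s => if v < y then y else s) acc := by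
  induction t generalizing acc with
  | nil => simp [tsucc, inorder]
  | node l x r ihl ihr =>
    simp only [inorder] at h ⊢
    have hp := List.pairwise_append.mp h
    by_cases h1 : v < x
    · simp only [tsucc, if_pos h1, List.foldr_append, List.foldr_cons, if_pos h1]
      exact ihl hp.1 x
    · have hl : ∀ y ∈ inorder l, ¬ v < y := by
        intro y hy hlt
        exact h1 (lt_trans hlt (hp.2.2 y hy x (by simp)))
      simp only [tsucc, if_neg h1, List.foldr_append, List.foldr_cons, if_neg h1]
      rw [ihr (List.pairwise_cons.mp hp.2.1).2 acc]
      exact (foldr_succ_const v (inorder l) _ hl).symm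

theorem foldr_succ_br (v : Int) (xs : List Int) (acc : Int) :
    xs.foldr (fun y s => if v < y then y else s) acc =
      if br xs v < xs.length then xs.getD (br xs v) 0 else acc := by
  induction xs with
  | nil => simp [br]
  | cons x t ih =>
    by_cases h1 : x ≤ v
    · have h2 : ¬ v < x := not_lt.mpr h1
      simp only [List.foldr_cons, if_neg h2, br, if_pos h1, ih, List.length_cons]
      by_cases hc : br t v < t.length
      · simp [hc, List.getD, Nat.succ_lt_succ hc]
      · simp [hc, Nat.succ_lt_succ_iff, if_neg hc]
    · have h2 : v < x := not_le.mp h1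
      simp [List.foldr_cons, if_pos h2, br, h1, List.getD]

theorem inorder_ne_nil (l : PTree) (x : Int) (r : PTree) :
    inorder (.node l x r) ≠ [] := by
  simp only [inorder]
  intro h
  exact absurd h (by simp)

theorem headD_append_left (l r' : List Int) (h : l ≠ []) :
    (l ++ r').headD 0 = l.headD 0 := by
  cases l with
  | nil => exact absurd rfl h
  | cons a t => simp

theorem getLastD_irrel (z : List Int) (h : z ≠ []) (d e : Int) :
    z.getLastD d = z.getLastD e := by
  rw [List.getLastD_eq_getLast?, List.getLastD_eq_getLast?]
  cases hz : z.getLast? with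
  | none => exact absurd (List.getLast?_eq_none_iff.mp hz) h
  | some a => simp

theorem getLastD_append_cons (l : List Int) (x : Int) (z : List Int) :
    (l ++ x :: z).getLastD 0 = (x :: z).getLastD 0 := by
  induction l with
  | nil => rfl
  | cons a t ih =>
    rw [List.cons_append, List.getLastD_cons,
      getLastD_irrel (t ++ x :: z) (by simp) a 0, ih]

theorem tmin_headD (t : PTree) : tmin t = (inorder t).headD 0 := by
  induction t with
  | nil => rfl
  | node l x r ihl ihr =>
    cases l with
    | nil => simp [tmin, inorder]
    | node a y b =>
      rw [show tmin (.node (.node a y b) x r) = tmin (.node a y b) from rfl, ihl,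
        show inorder (PTree.node (PTree.node a y b) x r)
            = inorder (PTree.node a y b) ++ x :: inorder r from rfl]
      exact (headD_append_left _ _ (inorder_ne_nil a y b)).symm

theorem tmax_getLastD (t : PTree) : tmax t = (inorder t).getLastD 0 := by
  induction t with
  | nil => rfl
  | node l x r ihl ihr =>
    cases r with
    | nil => simp [tmax, inorder, List.getLastD_concat]
    | node a y b =>
      rw [show tmax (.node l x (.node a y b)) = tmax (.node a y b) from rfl, ihr,
        show inorder (PTree.node l x (PTree.node a y b))
            = inorder l ++ x :: inorder (PTree.node a y b) from rfl,
        getLastD_append_cons, List.getLastD_cons]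
      exact (getLastD_irrel _ (inorder_ne_nil a y b) x 0).symm

-- the main loops agree whenever the list is the sorted inorder of the tree
theorem loop_eq (qs : List (List Int)) (t : PTree) (res : List Int)
    (hs : (inorder t).Pairwise (· < ·)) :
    loopA t res qs = loopB (inorder t) res qs := by
  induction qs generalizing t res with
  | nil => simp [loopA, loopB]
  | cons L rest ih =>
    simp only [loopA, loopB]
    set op := L.getD 0 0 with hop
    set v := L.getD 1 0 with hv
    by_cases h1 : op = 1
    · simp only [if_pos h1]
      have hins : inorder (tinsert t v) =
          (if bl (inorder t) v = (inorder t).length ∨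
              (inorder t).getD (bl (inorder t) v) 0 ≠ v
           then (inorder t).insertIdx (bl (inorder t) v) v else inorder t) := by
        rw [inorder_tinsert t v hs, ins_eq_insertIdx]
      have hps : (inorder (tinsert t v)).Pairwise (· < ·) := by
        rw [inorder_tinsert t v hs]
        exact pairwise_ins _ _ hs
      rw [← hins]
      exact ih (tinsert t v) res hps
    · simp only [if_neg h1]
      by_cases h2 : op = 2
      · simp only [if_pos h2]
        have hiff : (tfind t v = true) ↔
            (bl (inorder t) v < (inorder t).length ∧
             (inorder t).getD (bl (inorder t) v) 0 = v) :=
          (tfind_mem t v hs).trans (mem_iff_bl (inorder t) v hs)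
        rw [if_congr hiff rfl rfl]
        exact ih t _ hs
      · simp only [if_neg h2]
        by_cases h3 : op = 3
        · simp only [if_pos h3]
          rw [show tpre t v 0 =
              (if bl (inorder t) v = 0 then 0
               else (inorder t).getD (bl (inorder t) v - 1) 0) from by
            rw [tpre_foldl t v hs 0, foldl_pre_bl v _ 0 hs]]
          exact ih t _ hs
        · simp only [if_neg h3]
          by_cases h4 : op = 4
          · simp only [if_pos h4]
            rw [show tsucc t v 0 =
                (if br (inorder t) v < (inorder t).length
                 then (inorder t).getD (br (inorder t) v) 0 else 0) from by
              rw [tsucc_foldr t v hs 0, foldr_succ_br v _ 0]]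
            exact ih t _ hs
          · simp only [if_neg h4]
            by_cases h5 : op = 5
            · simp only [if_pos h5]
              rw [tmin_headD]
              exact ih t _ hs
            · simp only [if_neg h5]
              by_cases h6 : op = 6
              · simp only [if_pos h6]
                rw [show tmax t =
                    (if (inorder t).isEmpty then 0
                     else (inorder t).getLastD 0) from by
                  rw [tmax_getLastD]
                  cases inorder t <;> simp]
                exact ih t _ hs
              · simp only [if_neg h6]
                exact ih t res hs

-- ===== VERDICT (by name: the statement is the Claim_ definition above) =====
theorem BinarySearchTreeSimulation_spec : Claim_equal_BinarySearchTreeSimulation := by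
  intro m queries _ _
  unfold Spec_BinarySearchTreeSimulation BinarySearchTreeSimulation BinarySearchTreeSimulation_alt
  exact loop_eq queries .nil [] (by simp [inorder])
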